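-- pv_equiv track=rewrite | github.com/dgulotta/puzzle-tools | puzzletools/code.py | _find_ancestors
-- ===== SOURCE A (Python) =====
-- def _find_ancestors(from_anc,to_anc):
--     for fpos,a in enumerate(from_anc):
--         try:
--             tpos=to_anc.index(a)
--             return (fpos,tpos)
--         except ValueError:
--             pass
--     raise TypeError("Codes have no common ancestors")
-- ===== SOURCE B (Python) =====
-- def _find_ancestors(from_anc, to_anc):
--     # B: instead of scanning from_anc with an inner to_anc.index scan (A),
--     # build the map element -> first index in from_anc, then scan to_anc once
--     # keeping the candidate with the strictly smallest from-index (min-accumulator).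
--     first = {}
--     for i, a in enumerate(from_anc):
--         if a not in first:
--             first[a] = i
--     best = None
--     for t, a in enumerate(to_anc):
--         f = first.get(a)
--         if f is not None and (best is None or f < best[0]):
--             best = (f, t)
--     if best is None:
--         raise TypeError("Codes have no common ancestors")
--     return best
-- ===== Notes on version B (the rewrite author's own statement) =====
-- stated objective: alternative
-- what changed: B inverts the traversal: it indexes from_anc (element -> first position) and then makes one pass over to_anc maintaining a running minimum of the from-index (argmin accumulator), whereas A scans from_anc with early return and an inner linear to_anc.index scan.
import Mathlib
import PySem

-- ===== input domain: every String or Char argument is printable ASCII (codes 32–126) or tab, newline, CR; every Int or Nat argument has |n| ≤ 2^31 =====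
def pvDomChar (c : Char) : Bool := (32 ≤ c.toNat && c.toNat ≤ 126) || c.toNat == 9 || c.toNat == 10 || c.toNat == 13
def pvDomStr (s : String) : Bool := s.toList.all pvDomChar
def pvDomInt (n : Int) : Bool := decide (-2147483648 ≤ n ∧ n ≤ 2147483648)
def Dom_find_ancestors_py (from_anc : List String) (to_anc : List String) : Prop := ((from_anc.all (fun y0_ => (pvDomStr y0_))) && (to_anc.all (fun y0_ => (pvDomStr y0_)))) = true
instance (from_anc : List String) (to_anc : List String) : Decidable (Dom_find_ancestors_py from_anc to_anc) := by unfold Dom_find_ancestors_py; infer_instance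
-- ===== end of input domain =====

-- B inverts the traversal: it indexes from_anc (element -> first position) and scans to_anc
-- once with a running argmin of the from-index, instead of A's early-return scan of from_anc
-- with an inner to_anc.index scan (objective: alternative). Where Python A raises TypeError
-- (no common element) B raises too; those inputs are excluded by Pre_ and both ports return
-- the default (0, 0) there.

-- ===== PORT A =====
-- A's loop: for fpos,a in enumerate(from_anc): try tpos=to_anc.index(a); return (fpos,tpos)
def findA_aux (to_anc : List String) : List String → Int → Option (Int × Int)
  | [], _ => none
  | a :: rest, fpos =>
    match PySem.List.index? to_anc a with
    | some t => some (fpos, (t : Int))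
    | none => findA_aux to_anc rest (fpos + 1)

def find_ancestors_py (from_anc : List String) (to_anc : List String) : Int × Int :=
  (findA_aux to_anc from_anc 0).getD (0, 0)

-- ===== PORT B =====
-- first = {}; for i,a in enumerate(from_anc): if a not in first: first[a] = i
def firstIdx (from_anc : List String) : PySem.Dict String Int :=
  (PySem.List.enumerate from_anc).foldl
    (fun d p => if d.contains p.2 then d else d.insert p.2 p.1) PySem.Dict.empty

-- loop body: f = first.get(a); if f is not None and (best is None or f < best[0]): best = (f, t)
def stepB (d : PySem.Dict String Int) (best : Option (Int × Int)) (p : Int × String) :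
    Option (Int × Int) :=
  match d.get? p.2 with
  | some f =>
    match best with
    | none => some (f, p.1)
    | some b => if f < b.1 then some (f, p.1) else best
  | none => best

def find_ancestors_py_alt (from_anc : List String) (to_anc : List String) : Int × Int :=
  (((PySem.List.enumerate to_anc).foldl (stepB (firstIdx from_anc)) none)).getD (0, 0)

-- ===== PRECONDITION & SPEC =====
-- Pre_ excludes exactly the inputs with no common element, where Python A raises TypeError.
def Pre_find_ancestors_py (from_anc : List String) (to_anc : List String) : Prop :=
  ∃ a ∈ from_anc, a ∈ to_anc
instance (from_anc : List String) (to_anc : List String) : Decidable (Pre_find_ancestors_py from_anc to_anc) := by unfold Pre_find_ancestors_py; infer_instance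

def pvWitness_find_ancestors_py : List String × List String := (["b", "a"], ["a", "b"])

def Spec_find_ancestors_py (from_anc : List String) (to_anc : List String) (out : Int × Int) : Prop := out = find_ancestors_py_alt from_anc to_anc
instance (from_anc : List String) (to_anc : List String) (out : Int × Int) : Decidable (Spec_find_ancestors_py from_anc to_anc out) := by unfold Spec_find_ancestors_py; infer_instance

-- ===== CLAIM (what is proved, stated in full; the proofs are below) =====
def Claim_equal_find_ancestors_py : Prop := ∀ (from_anc : List String) (to_anc : List String), Dom_find_ancestors_py from_anc to_anc → Pre_find_ancestors_py from_anc to_anc → Spec_find_ancestors_py from_anc to_anc (find_ancestors_py from_anc to_anc)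

-- ===== LEMMAS AND PROOFS =====

-- step on bare candidate pairs (f, t): same update rule as stepB after the lookup succeeded
def mstep (best : Option (Int × Int)) (p : Int × Int) : Option (Int × Int) :=
  match best with
  | none => some p
  | some b => if p.1 < b.1 then some p else best

-- leftmost strict minimum (by first component) of a candidate list
def aminL : List (Int × Int) → Option (Int × Int)
  | [] => none
  | p :: rest =>
    match aminL rest with
    | none => some p
    | some q => if q.1 < p.1 then some q else some p

-- candidate list produced by B's scan of to_anc: (first from-index of a, position t)
def candsOf (from_anc : List String) : List String → Int → List (Int × Int)
  | [], _ => []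
  | a :: rest, t =>
    match PySem.List.index? from_anc a with
    | some f => ((f : Int), t) :: candsOf from_anc rest (t + 1)
    | none => candsOf from_anc rest (t + 1)

-- The first-index dict looks up as index? (generalized over accumulator and start).
theorem firstIdx_foldl_get? (l : List String) (s : Int) (d : PySem.Dict String Int) (a : String) :
    ((PySem.List.enumerate l s).foldl
      (fun d p => if d.contains p.2 then d else d.insert p.2 p.1) d).get? a =
    match d.get? a with
    | some v => some v
    | none => (PySem.List.index? l a).map (fun k => s + (k : Int)) := by
  induction l generalizing s d with
  | nil =>
    simp [PySem.List.enumerate_nil]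
    cases d.get? a <;> simp
  | cons x rest ih =>
    rw [PySem.List.enumerate_cons, List.foldl_cons]
    by_cases hc : d.contains x
    · rw [if_pos hc, ih]
      have hx : (d.get? x).isSome := by
        rw [← PySem.Dict.contains_eq_isSome_get?]; exact hc
      by_cases hax : a = x
      · subst hax
        obtain ⟨v, hv⟩ := Option.isSome_iff_exists.mp hx
        simp [hv]
      · cases hda : d.get? a with
        | some v => simp
        | none =>
          have := PySem.List.index?_cons_of_ne (v := a) (x := x) (xs := rest) (Ne.symm hax)
          rw [this]
          cases PySem.List.index? rest a <;> simp
          omega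
    · rw [if_neg hc, ih]
      by_cases hax : a = x
      · subst hax
        have hda : d.get? a = none := by
          rcases h : d.get? a with _ | v
          · rfl
          · exact absurd (by rw [PySem.Dict.contains_eq_isSome_get?, h]; rfl) hc
        dsimp only
        rw [PySem.Dict.get?_insert_self, hda, PySem.List.index?_cons_self]
        simp
      · dsimp only
        rw [PySem.Dict.get?_insert_of_ne d s hax,
            PySem.List.index?_cons_of_ne rest (Ne.symm hax)]
        cases d.get? a with
        | some v => simp
        | none =>
          cases PySem.List.index? rest a <;> simp
          omega

theorem firstIdx_get? (from_anc : List String) (a : String) :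
    (firstIdx from_anc).get? a = (PySem.List.index? from_anc a).map (fun k => (k : Int)) := by
  rw [firstIdx, firstIdx_foldl_get? from_anc 0 PySem.Dict.empty a,
      PySem.Dict.get?_empty]
  cases PySem.List.index? from_anc a <;> simp

-- B's fold over enumerate(to_anc) is the mstep fold over the candidate list.
theorem scan_eq_cands (from_anc : List String) (l : List String) (t : Int)
    (best : Option (Int × Int)) :
    (PySem.List.enumerate l t).foldl (stepB (firstIdx from_anc)) best =
    (candsOf from_anc l t).foldl mstep best := by
  induction l generalizing t best with
  | nil => simp [PySem.List.enumerate_nil, candsOf]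
  | cons a rest ih =>
    rw [PySem.List.enumerate_cons, List.foldl_cons, candsOf]
    have hs : stepB (firstIdx from_anc) best (t, a) =
        match PySem.List.index? from_anc a with
        | some f => mstep best ((f : Int), t)
        | none => best := by
      rw [stepB, firstIdx_get?]
      cases PySem.List.index? from_anc a <;> rfl
    rw [hs]
    cases PySem.List.index? from_anc a with
    | some f => rw [List.foldl_cons]; exact ih _ _
    | none => exact ih _ _

-- The mstep fold computes the leftmost strict minimum.
theorem foldl_mstep_some (L : List (Int × Int)) (b : Int × Int) :
    L.foldl mstep (some b) =
    match aminL L with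
    | none => some b
    | some q => if q.1 < b.1 then some q else some b := by
  induction L generalizing b with
  | nil => rfl
  | cons p rest ih =>
    rw [List.foldl_cons]
    show rest.foldl mstep (if p.1 < b.1 then some p else some b) = _
    rw [aminL]
    by_cases hpb : p.1 < b.1
    · rw [if_pos hpb, ih]
      cases aminL rest with
      | none => simp [hpb]
      | some q =>
        by_cases hqp : q.1 < p.1
        · have : q.1 < b.1 := lt_trans hqp hpb
          simp [hqp, this]
        · simp [hqp, hpb]
    · rw [if_neg hpb, ih]
      cases aminL rest with
      | none => simp [hpb]
      | some q =>
        by_cases hqp : q.1 < p.1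
        · by_cases hqb : q.1 < b.1 <;> simp [hqp, hqb]
        · have : ¬ q.1 < b.1 := by omega
          simp [hqp, hpb, this]

theorem foldl_mstep_none (L : List (Int × Int)) :
    L.foldl mstep none = aminL L := by
  cases L with
  | nil => rfl
  | cons p rest =>
    rw [List.foldl_cons]
    show rest.foldl mstep (some p) = _
    rw [foldl_mstep_some, aminL]

theorem aminL_mem (L : List (Int × Int)) (q : Int × Int) (h : aminL L = some q) : q ∈ L := by
  induction L with
  | nil => simp [aminL] at h
  | cons p rest ih =>
    rw [aminL] at h
    cases hr : aminL rest with
    | none => rw [hr] at h; dsimp only at h; simp at h; simp [h]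
    | some r =>
      rw [hr] at h
      dsimp only at h
      by_cases hrp : r.1 < p.1
      · rw [if_pos hrp] at h
        simp at h; subst h
        exact List.mem_cons_of_mem _ (ih hr)
      · rw [if_neg hrp] at h
        simp at h; simp [h]

theorem cands_fst_nonneg (from_anc : List String) (l : List String) (t : Int)
    (q : Int × Int) (h : q ∈ candsOf from_anc l t) : 0 ≤ q.1 := by
  induction l generalizing t with
  | nil => simp [candsOf] at h
  | cons a rest ih =>
    rw [candsOf] at h
    cases hi : PySem.List.index? from_anc a with
    | some f =>
      rw [hi] at h
      rcases List.mem_cons.mp h with h | h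
      · subst h; positivity
      · exact ih _ h
    | none => rw [hi] at h; exact ih _ h

-- If x occurs in to_anc (at first index k), the argmin over candidates for (x :: rest) is (0, t+k).
theorem aminL_cands_zero (x : String) (rest : List String) (l : List String) (t : Int)
    (k : Nat) (h : PySem.List.index? l x = some k) :
    aminL (candsOf (x :: rest) l t) = some (0, t + (k : Int)) := by
  induction l generalizing t k with
  | nil => simp [PySem.List.index?_eq_idxOf?] at h
  | cons a l' ih =>
    by_cases hax : a = x
    · subst hax
      rw [PySem.List.index?_cons_self] at h
      injection h with hk; subst hk
      rw [candsOf, PySem.List.index?_cons_self]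
      rw [aminL]
      cases hr : aminL (candsOf (a :: rest) l' (t + 1)) with
      | none => dsimp only; simp
      | some q =>
        have h0 : 0 ≤ q.1 := cands_fst_nonneg _ _ _ _ (aminL_mem _ _ hr)
        have hn : ¬ q.1 < (((0 : Nat) : Int)) := by push_cast; omega
        dsimp only
        rw [if_neg hn]
        simp
    · rw [PySem.List.index?_cons_of_ne l' hax] at h
      cases hk' : PySem.List.index? l' x with
      | none => rw [hk'] at h; simp at h
      | some k' =>
        rw [hk'] at h; simp at h
        obtain rfl : k = k' + 1 := h.symm
        rw [candsOf]
        cases hf : PySem.List.index? (x :: rest) a with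
        | none =>
          rw [ih _ _ hk']
          simp only [Option.some_inj, Prod.mk.injEq]
          push_cast
          exact ⟨trivial, by ring⟩
        | some f =>
          have hf1 : 1 ≤ f := by
            rw [PySem.List.index?_cons_of_ne rest (Ne.symm hax)] at hf
            cases hr : PySem.List.index? rest a with
            | none => rw [hr] at hf; simp at hf
            | some r => rw [hr] at hf; simp at hf; omega
          rw [aminL, ih _ _ hk']
          dsimp only
          have hlt : ((0 : Int)) < ((f : Nat) : Int) := by exact_mod_cast hf1
          rw [if_pos hlt]
          simp only [Option.some_inj, Prod.mk.injEq]
          push_cast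
          exact ⟨trivial, by ring⟩

-- If x does not occur in to_anc, prepending x to from_anc shifts all candidates' f by 1.
theorem cands_shift (x : String) (rest : List String) (l : List String) (t : Int)
    (h : PySem.List.index? l x = none) :
    candsOf (x :: rest) l t = (candsOf rest l t).map (fun p => (p.1 + 1, p.2)) := by
  induction l generalizing t with
  | nil => rfl
  | cons a l' ih =>
    have hax : a ≠ x := by
      intro he; subst he
      rw [PySem.List.index?_cons_self] at h; simp at h
    have hl' : PySem.List.index? l' x = none := by
      rw [PySem.List.index?_cons_of_ne l' hax] at h
      cases hr : PySem.List.index? l' x with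
      | none => rfl
      | some r => rw [hr] at h; simp at h
    rw [candsOf, candsOf, PySem.List.index?_cons_of_ne rest (Ne.symm hax)]
    cases hr : PySem.List.index? rest a with
    | some r =>
      dsimp only [Option.map_some]
      rw [ih _ hl', List.map_cons]
      simp only [List.cons.injEq, Prod.mk.injEq]
      exact ⟨⟨by push_cast; ring, trivial⟩, trivial⟩
    | none =>
      dsimp only [Option.map_none]
      exact ih _ hl'
  
theorem aminL_shift (L : List (Int × Int)) :
    aminL (L.map (fun p => (p.1 + 1, p.2))) = (aminL L).map (fun p => (p.1 + 1, p.2)) := by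
  induction L with
  | nil => rfl
  | cons p rest ih =>
    rw [List.map_cons, aminL, aminL, ih]
    cases aminL rest with
    | none => rfl
    | some q =>
      by_cases hq : q.1 < p.1
      · have : q.1 + 1 < p.1 + 1 := by omega
        simp [hq, this]
      · have : ¬ q.1 + 1 < p.1 + 1 := by omega
        simp [hq, this]

-- A's counter shift.
theorem findA_shift (to_anc : List String) (l : List String) (c : Int) :
    findA_aux to_anc l (c + 1) = (findA_aux to_anc l c).map (fun p => (p.1 + 1, p.2)) := by
  induction l generalizing c with
  | nil => rfl
  | cons a rest ih =>
    rw [findA_aux, findA_aux]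
    cases PySem.List.index? to_anc a with
    | some t => rfl
    | none => exact ih (c + 1)

-- Main: the argmin over B's candidates equals A's early-return scan.
theorem amin_cands_eq_findA (from_anc to_anc : List String) :
    aminL (candsOf from_anc to_anc 0) = findA_aux to_anc from_anc 0 := by
  induction from_anc with
  | nil =>
    have : candsOf ([] : List String) to_anc 0 = [] := by
      generalize (0 : Int) = t
      induction to_anc generalizing t with
      | nil => rfl
      | cons a l ih => rw [candsOf]; simp [PySem.List.index?_eq_idxOf?]; exact ih _
    rw [this]; rfl
  | cons x rest ih =>
    rw [findA_aux]
    cases hx : PySem.List.index? to_anc x with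
    | some k =>
      rw [aminL_cands_zero x rest to_anc 0 k hx]
      simp
    | none =>
      rw [cands_shift x rest to_anc 0 hx, aminL_shift, ih, ← findA_shift]

-- ===== VERDICT (by name: the statement is the Claim_ definition above) =====
theorem find_ancestors_py_spec : Claim_equal_find_ancestors_py := by
  intro from_anc to_anc _ _
  unfold Spec_find_ancestors_py find_ancestors_py find_ancestors_py_alt
  rw [scan_eq_cands, foldl_mstep_none, amin_cands_eq_findA]
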